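-- pv_equiv track=rewrite | github.com/steveopen1/skill-play | agent-plugins/OPENCODE/api-security-testing/skills/api-security-testing/tools/core/collectors/url_collector.py | _is_static_resource
-- ===== SOURCE A (Python) =====
-- def _is_static_resource(path: str) -> bool:
--     """判断是否为静态资源"""
--     static_extensions = [
--         '.js', '.css', '.jpg', '.jpeg', '.png', '.gif', '.svg', '.ico',
--         '.woff', '.woff2', '.ttf', '.eot', '.otf', '.map',
--         '.html', '.htm', '.xml', '.json',
--     ]
--
--     for ext in static_extensions:
--         if path.lower().endswith(ext):
--             return True
--
--     return False
-- ===== SOURCE B (Python) =====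
-- _STATIC_EXTENSIONS = frozenset({
--     '.js', '.css', '.jpg', '.jpeg', '.png', '.gif', '.svg', '.ico',
--     '.woff', '.woff2', '.ttf', '.eot', '.otf', '.map',
--     '.html', '.htm', '.xml', '.json',
-- })
--
--
-- def _is_static_resource(path: str) -> bool:
--     p = path.lower()
--     if '.' not in p:
--         return False
--     return '.' + p.rsplit('.', 1)[-1] in _STATIC_EXTENSIONS
-- ===== Notes on version B (the rewrite author's own statement) =====
-- stated objective: idiomatic
-- what changed: Replaces the linear scan of endswith tests over the extension list by computing the path's lowered extension once (text after the last dot, via rsplit) and looking it up in a precomputed frozenset.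
import Mathlib
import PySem

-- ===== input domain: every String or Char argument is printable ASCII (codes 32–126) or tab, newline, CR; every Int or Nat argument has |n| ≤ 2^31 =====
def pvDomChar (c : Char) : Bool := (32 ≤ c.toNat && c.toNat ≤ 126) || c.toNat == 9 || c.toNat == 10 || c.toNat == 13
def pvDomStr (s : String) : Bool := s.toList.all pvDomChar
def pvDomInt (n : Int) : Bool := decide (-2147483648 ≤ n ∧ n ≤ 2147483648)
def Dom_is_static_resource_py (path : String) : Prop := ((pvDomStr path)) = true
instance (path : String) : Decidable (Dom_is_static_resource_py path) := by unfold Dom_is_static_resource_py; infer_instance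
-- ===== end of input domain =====

-- B replaces A's linear endswith scan by a single extension lookup (after last dot) in a precomputed set; same return value, idiomatic rewrite.

-- ===== PORT A =====
def pvStaticExtensions : List String :=
  [".js", ".css", ".jpg", ".jpeg", ".png", ".gif", ".svg", ".ico",
   ".woff", ".woff2", ".ttf", ".eot", ".otf", ".map",
   ".html", ".htm", ".xml", ".json"]

-- the for-loop with early return
def pvExtLoop (p : String) : List String → Bool
  | [] => false
  | ext :: rest => if PySem.Str.endswith p ext then true else pvExtLoop p rest

def is_static_resource_py (path : String) : Bool :=
  pvExtLoop (PySem.Str.lower path) pvStaticExtensions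

-- ===== PORT B =====
def pvStaticExtSet : PySem.Set String :=
  PySem.Set.ofList
    [".js", ".css", ".jpg", ".jpeg", ".png", ".gif", ".svg", ".ico",
     ".woff", ".woff2", ".ttf", ".eot", ".otf", ".map",
     ".html", ".htm", ".xml", ".json"]

-- p.rsplit('.', 1)[-1] ported by hand (PySem has no rsplit): the characters after
-- the LAST '.', or the whole string if there is none — exact for this use.
def pvAfterLastDot (l : List Char) : List Char :=
  (l.reverse.takeWhile (fun c => c ≠ '.')).reverse

def is_static_resource_py_alt (path : String) : Bool :=
  let p := PySem.Str.lower path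
  if PySem.Str.isIn "." p then
    PySem.Set.contains pvStaticExtSet (String.ofList ('.' :: pvAfterLastDot p.toList))
  else
    false

-- ===== PRECONDITION & SPEC =====
def Spec_is_static_resource_py (path : String) (out : Bool) : Prop := out = is_static_resource_py_alt path
instance (path : String) (out : Bool) : Decidable (Spec_is_static_resource_py path out) := by unfold Spec_is_static_resource_py; infer_instance

-- ===== CLAIM (what is proved, stated in full; the proofs are below) =====
def Claim_equal_is_static_resource_py : Prop := ∀ (path : String), Dom_is_static_resource_py path → Spec_is_static_resource_py path (is_static_resource_py path)

-- ===== LEMMAS AND PROOFS =====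

-- takeWhile over a dot-free prefix followed by '.' stops exactly at the '.'
lemma pv_takeWhile_append_dot (y t : List Char) (hy : '.' ∉ y) :
    (y ++ '.' :: t).takeWhile (fun c => c ≠ '.') = y := by
  induction y with
  | nil => simp
  | cons a y ih =>
      have ha : a ≠ '.' := fun h => hy (h ▸ List.mem_cons_self)
      have ih' := ih (fun h => hy (List.mem_cons_of_mem _ h))
      simp only [List.cons_append, List.takeWhile_cons]
      simp [ha]
      simpa using ih'

-- key characterisation: 'y ++ [.]' is a prefix of r iff y is exactly r's dot-free prefix and r contains a dot
lemma pv_prefix_upto_dot (r y : List Char) (hy : '.' ∉ y) :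
    (y ++ ['.'] <+: r) ↔ (r.takeWhile (fun c => c ≠ '.') = y ∧ '.' ∈ r) := by
  constructor
  · rintro ⟨t, rfl⟩
    rw [List.append_assoc]
    simp only [List.singleton_append]
    exact ⟨pv_takeWhile_append_dot y t hy, by simp⟩
  · rintro ⟨hTW, hmem⟩
    have hsplit := List.takeWhile_append_dropWhile (p := fun c => c ≠ '.') (l := r)
    have hne : r.dropWhile (fun c => c ≠ '.') ≠ [] := by
      intro h
      rw [List.dropWhile_eq_nil_iff] at h
      have := h '.' hmem
      simp at this
    obtain ⟨c, t, hct⟩ := List.exists_cons_of_ne_nil hne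
    have hc' : c = '.' := by
      have h := List.head_dropWhile_not (p := fun c => c ≠ '.') (l := r) hne
      simp only [ne_eq, decide_not] at h hct
      simp only [hct, List.head_cons] at h
      simpa using h
    refine ⟨t, ?_⟩
    rw [← hsplit, hTW, hct, hc']
    simp

-- bool-level loop ↔ existential
lemma pv_extLoop_iff (p : String) (exts : List String) :
    pvExtLoop p exts = true ↔ ∃ e ∈ exts, PySem.Str.endswith p e = true := by
  induction exts with
  | nil => simp [pvExtLoop]
  | cons e rest ih =>
      simp only [pvExtLoop]
      by_cases h : PySem.Str.endswith p e = true
      · rw [if_pos h]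
        exact ⟨fun _ => ⟨e, List.mem_cons_self, h⟩, fun _ => rfl⟩
      · rw [if_neg h, ih]
        constructor
        · rintro ⟨e', he', hw⟩; exact ⟨e', List.mem_cons_of_mem _ he', hw⟩
        · rintro ⟨e', he', hw⟩
          rcases List.mem_cons.mp he' with rfl | he''
          · exact absurd hw h
          · exact ⟨e', he'', hw⟩

-- endswith for a single extension '.x' (x dot-free) = dot present and extension matches
lemma pv_endswith_iff (p : String) (x : List Char) (hx : '.' ∉ x) :
    PySem.Str.endswith p (String.ofList ('.' :: x)) = true ↔
      ('.' ∈ p.toList ∧ pvAfterLastDot p.toList = x) := by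
  rw [PySem.Str.endswith_eq, PySem.Chars.endswith_iff]
  have hl : (String.ofList ('.' :: x)).toList = '.' :: x := by simp
  rw [hl]
  rw [← List.reverse_prefix]
  have : ('.' :: x).reverse = x.reverse ++ ['.'] := by simp
  rw [this, pv_prefix_upto_dot _ _ (by simpa using hx)]
  unfold pvAfterLastDot
  constructor
  · rintro ⟨h1, h2⟩
    refine ⟨by simpa using h2, ?_⟩
    rw [h1]; simp
  · rintro ⟨h1, h2⟩
    refine ⟨?_, by simpa using h1⟩
    have := congrArg List.reverse h2
    simpa using this

-- '.' in p  ↔  '.' is a character of p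
lemma pv_isIn_dot (p : String) : PySem.Str.isIn "." p = true ↔ '.' ∈ p.toList := by
  rw [PySem.Str.isIn_iff_infix]
  constructor
  · rintro ⟨s, t, h⟩
    rw [← h]; simp
  · intro hm
    obtain ⟨s, t, h⟩ := List.append_of_mem hm
    exact ⟨s, t, by rw [h]; simp⟩

-- every listed extension is a dot followed by a dot-free tail
lemma pv_shape (e : String) (he : e ∈ pvStaticExtensions) :
    ∃ x, e = String.ofList ('.' :: x) ∧ '.' ∉ x := by
  simp only [pvStaticExtensions, List.mem_cons, List.not_mem_nil, or_false] at he
  rcases he with rfl|rfl|rfl|rfl|rfl|rfl|rfl|rfl|rfl|rfl|rfl|rfl|rfl|rfl|rfl|rfl|rfl|rfl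
  · exact ⟨['j', 's'], by decide, by decide⟩
  · exact ⟨['c', 's', 's'], by decide, by decide⟩
  · exact ⟨['j', 'p', 'g'], by decide, by decide⟩
  · exact ⟨['j', 'p', 'e', 'g'], by decide, by decide⟩
  · exact ⟨['p', 'n', 'g'], by decide, by decide⟩
  · exact ⟨['g', 'i', 'f'], by decide, by decide⟩
  · exact ⟨['s', 'v', 'g'], by decide, by decide⟩
  · exact ⟨['i', 'c', 'o'], by decide, by decide⟩
  · exact ⟨['w', 'o', 'f', 'f'], by decide, by decide⟩
  · exact ⟨['w', 'o', 'f', 'f', '2'], by decide, by decide⟩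
  · exact ⟨['t', 't', 'f'], by decide, by decide⟩
  · exact ⟨['e', 'o', 't'], by decide, by decide⟩
  · exact ⟨['o', 't', 'f'], by decide, by decide⟩
  · exact ⟨['m', 'a', 'p'], by decide, by decide⟩
  · exact ⟨['h', 't', 'm', 'l'], by decide, by decide⟩
  · exact ⟨['h', 't', 'm'], by decide, by decide⟩
  · exact ⟨['x', 'm', 'l'], by decide, by decide⟩
  · exact ⟨['j', 's', 'o', 'n'], by decide, by decide⟩

-- the two literal extension containers are the same list
lemma pv_set_eq : pvStaticExtSet = pvStaticExtensions := by decide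

-- ===== VERDICT (by name: the statement is the Claim_ definition above) =====
theorem is_static_resource_py_spec : Claim_equal_is_static_resource_py := by
  intro path _
  unfold Spec_is_static_resource_py
  simp only [is_static_resource_py, is_static_resource_py_alt]
  set p := PySem.Str.lower path with hp
  rw [Bool.eq_iff_iff, pv_extLoop_iff, pv_set_eq]
  by_cases hdot : '.' ∈ p.toList
  · rw [if_pos ((pv_isIn_dot p).mpr hdot)]
    constructor
    · rintro ⟨e, he, hw⟩
      obtain ⟨x, rfl, hx⟩ := pv_shape e he
      rw [pv_endswith_iff p x hx] at hw
      rw [hw.2]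
      simpa [PySem.Set.contains] using he
    · intro hc
      have hk : String.ofList ('.' :: pvAfterLastDot p.toList) ∈ pvStaticExtensions := by
        simpa [PySem.Set.contains] using hc
      obtain ⟨x, hkey, hx⟩ := pv_shape _ hk
      have hax : pvAfterLastDot p.toList = x := by
        have := congrArg String.toList hkey
        simpa using this
      refine ⟨_, hk, ?_⟩
      rw [hkey]
      exact (pv_endswith_iff p x hx).mpr ⟨hdot, hax⟩
  · rw [if_neg (fun h => hdot ((pv_isIn_dot p).mp h))]
    constructor
    · rintro ⟨e, he, hw⟩
      obtain ⟨x, rfl, hx⟩ := pv_shape e he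
      rw [pv_endswith_iff p x hx] at hw
      exact absurd hw.1 hdot
    · intro h; exact absurd h (by simp)
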